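-- pv_equiv track=rewrite | github.com/ngocthienta/hackathon | wp12.py | create_triplets
-- ===== SOURCE A (Python) =====
-- def create_triplets(n):
--     triplets_list = []
--     while n != 0:
--         raw_num = str(n % 1000)
--         while len(raw_num) < 3:
--             raw_num = '0{}'.format(raw_num)
--         triplets_list.append(raw_num)
--         n //= 1000
--     while len(triplets_list) < 4:
--         triplets_list.append('000')
--     return triplets_list
-- ===== SOURCE B (Python) =====
-- def create_triplets(n):
--     # count triplets: at least 4, else enough to cover n (1000**k > n)
--     k = 4
--     while 1000 ** k <= n:
--         k += 1
--     return ['%03d' % (n // 1000 ** i % 1000) for i in range(k)]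
-- ===== Notes on version B (the rewrite author's own statement) =====
-- stated objective: alternative
-- what changed: Replaces A's destructive divide-and-append loop plus two padding loops by a closed-form comprehension that reads the i-th base-1000 digit directly as n // 1000**i % 1000 formatted with '%03d', after computing the triplet count k = max(4, digits needed) by comparing powers.
import Mathlib
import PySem

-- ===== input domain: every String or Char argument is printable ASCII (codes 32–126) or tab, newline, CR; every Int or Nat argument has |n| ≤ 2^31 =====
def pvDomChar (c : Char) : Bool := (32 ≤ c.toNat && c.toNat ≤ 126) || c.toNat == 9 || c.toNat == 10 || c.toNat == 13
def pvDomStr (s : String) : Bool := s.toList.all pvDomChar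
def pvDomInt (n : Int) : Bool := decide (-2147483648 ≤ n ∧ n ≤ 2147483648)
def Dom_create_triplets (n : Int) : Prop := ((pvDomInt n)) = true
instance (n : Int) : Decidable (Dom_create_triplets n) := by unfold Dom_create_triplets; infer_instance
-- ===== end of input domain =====

-- B replaces A's destructive divide-and-append loop (plus two padding loops) by a closed-form
-- comprehension reading the i-th base-1000 digit as n // 1000**i % 1000 ('%03d'-formatted);
-- same cost, different shape (objective: alternative). Equal on all n ≥ 0 (A never returns on n < 0).

-- ===== PORT A =====
-- inner while: "while len(raw_num) < 3: raw_num = '0{}'.format(raw_num)"; fuel 3 suffices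
-- ('0{}'.format(s) is ported by hand as prepending '0' to the characters; exact).
def padWhileA : Nat → String → String
  | 0, s => s
  | f + 1, s => if PySem.Str.len s < 3 then padWhileA f (String.ofList ('0' :: s.toList)) else s

-- outer while: "while n != 0: … ; n //= 1000"; totalized with fuel n.toNat + 1 (enough for every
-- n ≥ 0; the Python loop never terminates for n < 0, which Pre_ excludes).
def aLoop : Nat → Int → List String → List String
  | 0, _, acc => acc
  | f + 1, n, acc =>
    if n ≠ 0 then
      aLoop f (PySem.Int.floordiv n 1000)
        (acc ++ [padWhileA 3 (PySem.Int.toStr (PySem.Int.mod n 1000))])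
    else acc

-- "while len(triplets_list) < 4: triplets_list.append('000')"; fuel 4 suffices
def padListA : Nat → List String → List String
  | 0, l => l
  | f + 1, l => if l.length < 4 then padListA f (l ++ ["000"]) else l

def create_triplets (n : Int) : List String :=
  padListA 4 (aLoop (n.toNat + 1) n [])

-- ===== PORT B =====
-- "while 1000 ** k <= n: k += 1"
def kLoopB (n : Int) (k : Nat) : Nat :=
  if h : (1000 : Int) ^ k ≤ n then kLoopB n (k + 1) else k
termination_by n.toNat + 1 - 1000 ^ k
decreasing_by
  have h1 : ((1000 : Nat) ^ k : Int) ≤ n := by push_cast; exact h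
  have h0 : (0 : Int) ≤ n := le_trans (by positivity) h1
  have h2 : (1000 : Nat) ^ k ≤ n.toNat := by omega
  have h3 : (1000 : Nat) ^ k < 1000 ^ (k + 1) :=
    Nat.pow_lt_pow_right (by norm_num) (Nat.lt_succ_self k)
  omega

-- "'%03d' % x" ported by hand as zero-fill to 3 characters; exact for 0 ≤ x
-- (every value reaching it here is some y % 1000 ∈ [0, 1000)).
def fmt03B (x : Int) : String :=
  String.ofList (List.replicate (3 - (PySem.Int.toChars x).length) '0' ++ PySem.Int.toChars x)

def create_triplets_alt (n : Int) : List String :=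
  -- k = kLoopB n 4 inlined into the comprehension bound
  (PySem.List.pyRange 0 ((kLoopB n 4 : Nat) : Int) 1).map
    (fun i => fmt03B (PySem.Int.mod (PySem.Int.floordiv n ((1000 : Int) ^ i.toNat)) 1000))
    -- 1000 ** i with i drawn from range(k), so i ≥ 0: '^ i.toNat' is exact

-- ===== PRECONDITION & SPEC =====
-- Pre_ excludes n < 0: there A's 'while n != 0' never terminates (n //= 1000 stalls at -1), so A
-- returns no value at all; nothing is hidden on inputs A returns on.
def Pre_create_triplets (n : Int) : Prop := 0 ≤ n
instance (n : Int) : Decidable (Pre_create_triplets n) := by unfold Pre_create_triplets; infer_instance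

def pvWitness_create_triplets : Int := (1234567)

def Spec_create_triplets (n : Int) (out : List String) : Prop := out = create_triplets_alt n
instance (n : Int) (out : List String) : Decidable (Spec_create_triplets n out) := by unfold Spec_create_triplets; infer_instance

-- ===== CLAIM (what is proved, stated in full; the proofs are below) =====
def Claim_equal_create_triplets : Prop := ∀ (n : Int), Dom_create_triplets n → Pre_create_triplets n → Spec_create_triplets n (create_triplets n)

-- ===== LEMMAS AND PROOFS =====

-- the list A's outer loop builds, as a structural recursion on the Nat value
def tripN (m : Nat) : List String :=
  if h : m = 0 then [] else
    padWhileA 3 (PySem.Int.toStr ((m % 1000 : Nat) : Int)) :: tripN (m / 1000)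
decreasing_by exact Nat.div_lt_self (Nat.pos_of_ne_zero h) (by norm_num)

lemma tripN_zero : tripN 0 = [] := by rw [tripN]; simp

lemma tripN_pos (m : Nat) (h : m ≠ 0) :
    tripN m = padWhileA 3 (PySem.Int.toStr ((m % 1000 : Nat) : Int)) :: tripN (m / 1000) := by
  rw [tripN]; simp [h]

lemma aLoop_eq_tripN : ∀ (fuel m : Nat) (acc : List String), m < 1000 ^ fuel →
    aLoop fuel (m : Int) acc = acc ++ tripN m := by
  intro fuel
  induction fuel with
  | zero => intro m acc h; interval_cases m; simp [aLoop, tripN_zero]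
  | succ f ih =>
    intro m acc h
    by_cases hm : m = 0
    · subst hm; simp [aLoop, tripN_zero]
    · have hcast : ((m : Int) ≠ 0) := by exact_mod_cast hm
      have hdiv : m / 1000 < 1000 ^ f := by
        have : m < 1000 ^ f * 1000 := by
          calc m < 1000 ^ (f + 1) := h
          _ = 1000 ^ f * 1000 := by ring
        omega
      have hfd : PySem.Int.floordiv (m : Int) 1000 = ((m / 1000 : Nat) : Int) := by
        exact_mod_cast PySem.Int.floordiv_natCast m 1000
      have hmd : PySem.Int.mod (m : Int) 1000 = ((m % 1000 : Nat) : Int) := by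
        exact_mod_cast PySem.Int.mod_natCast m 1000
      simp only [aLoop, hcast, ne_eq, not_false_eq_true, if_true, hfd, hmd]
      rw [ih (m / 1000) _ hdiv, tripN_pos m hm]
      simp

lemma toChars_len_nat (x : Nat) (hx : x < 1000) :
    1 ≤ (PySem.Int.toChars (x : Int)).length ∧ (PySem.Int.toChars (x : Int)).length ≤ 3 := by
  have hnn : ¬ ((x : Int) < 0) := by omega
  have he : PySem.Int.toChars (x : Int) = Nat.toDigits 10 x := by
    simp [PySem.Int.toChars, hnn]
  rw [he]
  constructor
  · unfold Nat.toDigits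
    by_cases h10 : x / 10 = 0 <;>
      simp [Nat.toDigitsCore, h10, Nat.toDigitsCore_lens_eq]
  · exact Nat.toDigits_length 10 x 3 (by norm_num) (by norm_num; omega)

lemma padWhileA_eq_fill (l : List Char) (h1 : 1 ≤ l.length) (h3 : l.length ≤ 3) :
    padWhileA 3 (String.ofList l) = String.ofList (List.replicate (3 - l.length) '0' ++ l) := by
  match l, h1, h3 with
  | [a], _, _ => norm_num [padWhileA, PySem.Str.len_eq, List.replicate]
  | [a, b], _, _ => norm_num [padWhileA, PySem.Str.len_eq, List.replicate]
  | [a, b, c], _, _ => norm_num [padWhileA, PySem.Str.len_eq, List.replicate]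

lemma pad_eq_fmt (x : Nat) (hx : x < 1000) :
    padWhileA 3 (PySem.Int.toStr (x : Int)) = fmt03B (x : Int) := by
  obtain ⟨h1, h3⟩ := toChars_len_nat x hx
  have hs : PySem.Int.toStr (x : Int) = String.ofList (PySem.Int.toChars (x : Int)) := by
    have h := congrArg String.ofList (PySem.Int.toList_toStr (x : Int))
    rwa [String.ofList_toList] at h
  rw [hs, padWhileA_eq_fill _ h1 h3, fmt03B]

-- B's counting loop stops immediately within the domain bound
lemma kLoopB_dom (n : Int) (hd : n ≤ 2147483648) : kLoopB n 4 = 4 := by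
  have h : ¬ ((1000 : Int) ^ 4 ≤ n) := by norm_num; omega
  rw [kLoopB, dif_neg h]

-- A's padded loop output, digit by digit
lemma padListA_tripN (m : Nat) (h : m < 1000 ^ 4) :
    padListA 4 (tripN m) =
      [padWhileA 3 (PySem.Int.toStr ((m / 1000 ^ 0 % 1000 : Nat) : Int)),
       padWhileA 3 (PySem.Int.toStr ((m / 1000 ^ 1 % 1000 : Nat) : Int)),
       padWhileA 3 (PySem.Int.toStr ((m / 1000 ^ 2 % 1000 : Nat) : Int)),
       padWhileA 3 (PySem.Int.toStr ((m / 1000 ^ 3 % 1000 : Nat) : Int))] := by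
  have pad0 : padWhileA 3 (PySem.Int.toStr 0) = "000" := by decide
  by_cases h0 : m = 0
  · subst h0; simp only [tripN_zero]
    norm_num [padListA, pad0]
  by_cases hA : m < 1000
  · have d1 : m / 1000 ^ 1 % 1000 = 0 := by rw [Nat.div_eq_of_lt (by omega)]
    have d2 : m / 1000 ^ 2 % 1000 = 0 := by rw [Nat.div_eq_of_lt (by nlinarith)]
    have d3 : m / 1000 ^ 3 % 1000 = 0 := by rw [Nat.div_eq_of_lt (by nlinarith)]
    rw [tripN_pos m h0, Nat.div_eq_of_lt hA, tripN_zero, d1, d2, d3]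
    norm_num [padListA, pad0]
  by_cases hB : m < 1000 ^ 2
  · have hq : m / 1000 ≠ 0 := by intro hz; exact hA (by omega)
    have hlt : m / 1000 < 1000 := (Nat.div_lt_iff_lt_mul (by norm_num)).mpr (by nlinarith)
    have d2 : m / 1000 ^ 2 % 1000 = 0 := by rw [Nat.div_eq_of_lt (by nlinarith)]
    have d3 : m / 1000 ^ 3 % 1000 = 0 := by rw [Nat.div_eq_of_lt (by nlinarith)]
    rw [tripN_pos m h0, tripN_pos _ hq, Nat.div_eq_of_lt hlt, tripN_zero, d2, d3]
    norm_num [padListA, pad0]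
  by_cases hC : m < 1000 ^ 3
  · have hq1 : m / 1000 ≠ 0 := by intro hz; exact hA (by omega)
    have hq2 : m / 1000 / 1000 ≠ 0 := by
      intro hz
      have h1 : m / 1000 < 1000 := by omega
      have := (Nat.div_lt_iff_lt_mul (k := 1000) (by norm_num)).mp h1
      exact hB (by nlinarith)
    have hlt : m / 1000 / 1000 < 1000 := by
      rw [Nat.div_div_eq_div_mul]
      exact (Nat.div_lt_iff_lt_mul (by norm_num)).mpr (by nlinarith)
    have d3 : m / 1000 ^ 3 % 1000 = 0 := by rw [Nat.div_eq_of_lt (by nlinarith)]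
    rw [tripN_pos m h0, tripN_pos _ hq1, tripN_pos _ hq2, Nat.div_eq_of_lt hlt, tripN_zero, d3]
    norm_num [padListA, pad0, Nat.div_div_eq_div_mul]
  · have hq1 : m / 1000 ≠ 0 := by intro hz; exact hA (by omega)
    have hq2 : m / 1000 / 1000 ≠ 0 := by
      intro hz
      have h1 : m / 1000 < 1000 := by omega
      have := (Nat.div_lt_iff_lt_mul (k := 1000) (by norm_num)).mp h1
      exact hC (by nlinarith)
    have hq3 : m / 1000 / 1000 / 1000 ≠ 0 := by
      intro hz
      have h1 : m / 1000 / 1000 < 1000 := by omega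
      rw [Nat.div_div_eq_div_mul] at h1
      have := (Nat.div_lt_iff_lt_mul (k := 1000 * 1000) (by norm_num)).mp h1
      exact hC (by nlinarith)
    have hlt : m / 1000 / 1000 / 1000 < 1000 := by
      rw [Nat.div_div_eq_div_mul, Nat.div_div_eq_div_mul]
      exact (Nat.div_lt_iff_lt_mul (by norm_num)).mpr (by nlinarith)
    rw [tripN_pos m h0, tripN_pos _ hq1, tripN_pos _ hq2, tripN_pos _ hq3,
        Nat.div_eq_of_lt hlt, tripN_zero]
    norm_num [padListA, Nat.div_div_eq_div_mul]

-- ===== VERDICT (by name: the statement is the Claim_ definition above) =====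
theorem create_triplets_spec : Claim_equal_create_triplets := by
  intro n hdom hpre
  unfold Spec_create_triplets
  obtain ⟨m, rfl⟩ : ∃ m : Nat, n = (m : Int) := ⟨n.toNat, (Int.toNat_of_nonneg hpre).symm⟩
  have hbound : (m : Int) ≤ 2147483648 := by
    unfold Dom_create_triplets pvDomInt at hdom
    simpa using (of_decide_eq_true hdom).2
  have hm4 : m < 1000 ^ 4 := by norm_num; omega
  -- A's side
  have hfuel : m < 1000 ^ (m + 1) := by
    calc m < 1000 ^ m := Nat.lt_pow_self (by norm_num)
    _ ≤ 1000 ^ (m + 1) := Nat.pow_le_pow_right (by norm_num) (Nat.le_succ m)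
  have hA : create_triplets (m : Int) =
      padListA 4 (tripN m) := by
    unfold create_triplets
    rw [show ((m : Int)).toNat = m from Int.toNat_natCast m, aLoop_eq_tripN (m + 1) m [] hfuel]
    simp
  -- B's side
  have hk : kLoopB (m : Int) 4 = 4 := kLoopB_dom _ hbound
  have hrange : PySem.List.pyRange 0 ((4 : Nat) : Int) 1 = [0, 1, 2, 3] := by decide
  have hgi : ∀ i : Nat, PySem.Int.mod (PySem.Int.floordiv (m : Int) ((1000 : Int) ^ i)) 1000
      = ((m / 1000 ^ i % 1000 : Nat) : Int) := by
    intro i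
    have hfd : PySem.Int.floordiv (m : Int) ((1000 : Int) ^ i) = ((m / 1000 ^ i : Nat) : Int) := by
      have := PySem.Int.floordiv_natCast m (1000 ^ i)
      push_cast at this ⊢
      exact this
    rw [hfd]
    exact_mod_cast PySem.Int.mod_natCast (m / 1000 ^ i) 1000
  have hB : create_triplets_alt (m : Int) =
      [fmt03B ((m / 1000 ^ 0 % 1000 : Nat) : Int),
       fmt03B ((m / 1000 ^ 1 % 1000 : Nat) : Int),
       fmt03B ((m / 1000 ^ 2 % 1000 : Nat) : Int),
       fmt03B ((m / 1000 ^ 3 % 1000 : Nat) : Int)] := by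
    unfold create_triplets_alt
    rw [hk, hrange]
    simp only [List.map]
    rw [show ((0 : Int)).toNat = 0 from rfl, show ((1 : Int)).toNat = 1 from rfl,
        show ((2 : Int)).toNat = 2 from rfl, show ((3 : Int)).toNat = 3 from rfl,
        hgi 0, hgi 1, hgi 2, hgi 3]
  rw [hA, hB, padListA_tripN m hm4,
      pad_eq_fmt _ (Nat.mod_lt _ (by norm_num)), pad_eq_fmt _ (Nat.mod_lt _ (by norm_num)),
      pad_eq_fmt _ (Nat.mod_lt _ (by norm_num)), pad_eq_fmt _ (Nat.mod_lt _ (by norm_num))]
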